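-- pv_equiv track=rewrite | github.com/Sakamotto/IFES_Prog2 | Programas/libplnbsi.py | corrente
-- ===== SOURCE A (Python) =====
-- def corrente(pTexto, pPosicao):
-- 	strSeparadores = " ,.:;!?"
-- 	esquerda = pPosicao; direita = pPosicao; palavra = "Não tem nada aqui :/"
--
-- 	if pTexto[esquerda] not in strSeparadores:
-- 		while esquerda >= 0 and pTexto[esquerda] not in strSeparadores:
-- 			esquerda -= 1
-- 		#
-- 		while direita < len(pTexto) and pTexto[direita] not in strSeparadores:
-- 			direita += 1
-- 		#
-- 		palavra = pTexto[esquerda + 1:direita]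
-- 	else:
-- 		palavra = "None"
-- 	#
-- 	return palavra
-- ===== SOURCE B (Python) =====
-- def corrente(pTexto, pPosicao):
--     seps = " ,.:;!?"
--     if pTexto[pPosicao] in seps:
--         return "None"
--     n = len(pTexto)
--     i = pPosicao if pPosicao >= 0 else n + pPosicao
--     left = max((pTexto.rfind(s, 0, i) for s in seps), default=-1)
--     right = min((j for j in (pTexto.find(s, i) for s in seps) if j != -1), default=n)
--     return pTexto[left + 1:right]
-- ===== Notes on version B (the rewrite author's own statement) =====
-- stated objective: idiomatic
-- what changed: A's two manual char-by-char while loops are replaced by per-separator string searches: the left word boundary is the max of rfind(sep, 0, i) over the seven separators and the right boundary the min of find(sep, i) (ignoring -1, defaulting to len), then one slice.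
-- intended difference: On a negative in-range pPosicao whose character is not a separator, A returns an accidental slice (its left scan never runs because of the `esquerda >= 0` guard while its right scan wraps around), e.g. A('cy', -2) == 'y'; B returns the word around position len+pPosicao ('cy'), which is the intended value. — e.g. on corrente("cy", -2): A returns "y", B returns "cy"
import Mathlib
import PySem

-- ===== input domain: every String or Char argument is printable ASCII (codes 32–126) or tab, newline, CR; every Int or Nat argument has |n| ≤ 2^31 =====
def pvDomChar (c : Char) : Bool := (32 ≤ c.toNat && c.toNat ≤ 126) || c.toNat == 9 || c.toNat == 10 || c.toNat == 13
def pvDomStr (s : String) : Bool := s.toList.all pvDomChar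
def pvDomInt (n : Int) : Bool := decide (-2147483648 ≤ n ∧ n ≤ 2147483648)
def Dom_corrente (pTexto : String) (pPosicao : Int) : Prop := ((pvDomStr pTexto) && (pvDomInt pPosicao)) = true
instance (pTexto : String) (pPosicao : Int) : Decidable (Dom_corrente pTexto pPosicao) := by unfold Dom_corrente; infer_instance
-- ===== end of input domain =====

-- B replaces A's two manual char-by-char while loops by per-separator rfind/find string
-- searches combined with max/min over the seven separators (objective: idiomatic, not
-- faster); on negative in-range positions at a non-separator character A's returned slice
-- is an accident of its `esquerda >= 0` guard and B returns the word there (see D_corrente).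


-- ===== PORT A =====
-- strSeparadores = " ,.:;!?"
def pvSeps : List Char := " ,.:;!?".toList

-- `c in strSeparadores` (the 1-character string pTexto[k] tested for membership)
def pvIsSep (c : Char) : Bool := PySem.Chars.isIn [c] pvSeps

-- `while esquerda >= 0 and pTexto[esquerda] not in strSeparadores: esquerda -= 1`
-- (fuel bounds the iteration count; `none` from pyGet? = IndexError, outside Pre_)
def pvLeftA (l : List Char) : Int → Nat → Int
  | e, 0 => e
  | e, f+1 =>
    if 0 ≤ e then
      match PySem.List.pyGet? l e with
      | some c => if pvIsSep c then e else pvLeftA l (e-1) f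
      | none => e
    else e

-- `while direita < len(pTexto) and pTexto[direita] not in strSeparadores: direita += 1`
def pvRightA (l : List Char) : Int → Nat → Int
  | d, 0 => d
  | d, f+1 =>
    if d < (l.length : Int) then
      match PySem.List.pyGet? l d with
      | some c => if pvIsSep c then d else pvRightA l (d+1) f
      | none => d
    else d

def corrente (pTexto : String) (pPosicao : Int) : String :=
  let l := pTexto.toList
  match PySem.List.pyGet? l pPosicao with
  | none => ""   -- Python raises IndexError here (outside Pre_corrente)
  | some c =>
    if pvIsSep c then "None"
    else
      let e := pvLeftA l pPosicao (pPosicao.toNat + 1)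
      let d := pvRightA l pPosicao (2 * l.length + 1)
      String.ofList (PySem.List.slice l (some (e + 1)) (some d))

-- ===== PORT B =====
def corrente_alt (pTexto : String) (pPosicao : Int) : String :=
  let l := pTexto.toList
  match PySem.List.pyGet? l pPosicao with
  | none => ""   -- Python raises IndexError here (outside Pre_corrente)
  | some c =>
    if pvIsSep c then "None"
    else
      let n : Int := l.length
      let i : Int := if 0 ≤ pPosicao then pPosicao else n + pPosicao
      -- left = max((pTexto.rfind(s, 0, i) for s in seps), default=-1)
      let left : Int := PySem.List.maxD (pvSeps.map (fun s => PySem.Chars.rfindFrom l [s] 0 (some i))) (fun j => j) (-1)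
      -- right = min((j for j in (pTexto.find(s, i) for s in seps) if j != -1), default=n)
      let cands := (pvSeps.map (fun s => PySem.Chars.findFrom l [s] i none)).filter (fun j => j != -1)
      let right : Int := PySem.List.minD cands (fun j => j) n
      String.ofList (PySem.List.slice l (some (left + 1)) (some right))

-- ===== PRECONDITION & SPEC =====
-- Pre_ excludes exactly the out-of-range positions, where Python's pTexto[pPosicao] raises IndexError.
def Pre_corrente (pTexto : String) (pPosicao : Int) : Prop :=
  -(pTexto.toList.length : Int) ≤ pPosicao ∧ pPosicao < pTexto.toList.length
instance (pTexto : String) (pPosicao : Int) : Decidable (Pre_corrente pTexto pPosicao) := by unfold Pre_corrente; infer_instance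

def pvWitness_corrente : String × Int := ("ab cd", 0)

-- On a negative in-range pPosicao whose character is not a separator, A returns an
-- accidental slice (its left scan never runs because of the `esquerda >= 0` guard while
-- its right scan wraps around), whereas B returns the word around position len+pPosicao,
-- which is the intended value.
def D_corrente (pTexto : String) (pPosicao : Int) : Prop :=
  pPosicao < 0 ∧ -(pTexto.toList.length : Int) ≤ pPosicao ∧
    pTexto.toList.getD ((pTexto.toList.length : Int) + pPosicao).toNat ' ' ∉ " ,.:;!?".toList
instance (pTexto : String) (pPosicao : Int) : Decidable (D_corrente pTexto pPosicao) := by unfold D_corrente; infer_instance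

def Spec_corrente (pTexto : String) (pPosicao : Int) (out : String) : Prop :=
  ¬ D_corrente pTexto pPosicao → out = corrente_alt pTexto pPosicao
instance (pTexto : String) (pPosicao : Int) (out : String) : Decidable (Spec_corrente pTexto pPosicao out) := by unfold Spec_corrente; infer_instance

def pvDiffWitness_corrente : String × Int := ("cy", -2)
def pvDiffWitnessOut_corrente : String × String := ("y", "cy")

-- ===== CLAIM (what is proved, stated in full; the proofs are below) =====
def Claim_unchanged_corrente : Prop := ∀ (pTexto : String) (pPosicao : Int), Dom_corrente pTexto pPosicao → Pre_corrente pTexto pPosicao → Spec_corrente pTexto pPosicao (corrente pTexto pPosicao)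
def Claim_changed_corrente : Prop := Dom_corrente (pvDiffWitness_corrente.1) (pvDiffWitness_corrente.2) ∧ Pre_corrente (pvDiffWitness_corrente.1) (pvDiffWitness_corrente.2) ∧ D_corrente (pvDiffWitness_corrente.1) (pvDiffWitness_corrente.2) ∧ corrente (pvDiffWitness_corrente.1) (pvDiffWitness_corrente.2) = pvDiffWitnessOut_corrente.1 ∧ corrente_alt (pvDiffWitness_corrente.1) (pvDiffWitness_corrente.2) = pvDiffWitnessOut_corrente.2 ∧ pvDiffWitnessOut_corrente.1 ≠ pvDiffWitnessOut_corrente.2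

-- ===== LEMMAS AND PROOFS =====

-- last index k' < k with l[k'] = c (what Python's rfind(c, 0, k) yields), else -1
def myLast (l : List Char) (c : Char) : Nat → Int
  | 0 => -1
  | k+1 => if l[k]? = some c then (k : Int) else myLast l c k

-- last index k' < k with l[k'] a separator, else -1 (what A's left loop lands on)
def lastSep (l : List Char) : Nat → Int
  | 0 => -1
  | k+1 => if pvIsSep (l.getD k ' ') then (k : Int) else lastSep l k

-- first index j ≥ i with l[j] = c (what Python's find(c, i) yields), else -1
def myFirst (l : List Char) (c : Char) (i : Nat) : Int :=
  if h : i < l.length then (if l[i] = c then (i : Int) else myFirst l c (i+1)) else -1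
termination_by l.length - i

-- first index j ≥ i with l[j] a separator, else len (where A's right loop stops)
def firstSep (l : List Char) (i : Nat) : Int :=
  if h : i < l.length then (if pvIsSep l[i] then (i : Int) else firstSep l (i+1)) else (i : Int)
termination_by l.length - i

theorem myFirst_unfold (l : List Char) (c : Char) (i : Nat) :
    myFirst l c i = if h : i < l.length then (if l[i] = c then (i : Int) else myFirst l c (i+1)) else -1 := by
  rw [myFirst]

theorem firstSep_unfold (l : List Char) (i : Nat) :
    firstSep l i = if h : i < l.length then (if pvIsSep l[i] then (i : Int) else firstSep l (i+1)) else (i : Int) := by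
  rw [firstSep]

theorem myLast_succ (l : List Char) (c : Char) (k : Nat) :
    myLast l c (k+1) = if l[k]? = some c then (k : Int) else myLast l c k := rfl

theorem lastSep_succ (l : List Char) (k : Nat) :
    lastSep l (k+1) = if pvIsSep (l.getD k ' ') then (k : Int) else lastSep l k := rfl

theorem pvIsSep_eq (c : Char) : pvIsSep c = pvSeps.contains c := by
  unfold pvIsSep
  have hsingle : [c] <:+: pvSeps ↔ c ∈ pvSeps := by
    constructor
    · intro hi; exact hi.mem (by simp)
    · intro hm
      obtain ⟨s, t, ht⟩ := List.append_of_mem hm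
      exact ⟨s, t, by rw [ht]; simp⟩
  have h1 : (PySem.Chars.isIn [c] pvSeps = true) ↔ c ∈ pvSeps :=
    (PySem.Chars.isIn_iff_infix [c] pvSeps).trans hsingle
  apply Bool.coe_iff_coe.mp
  simpa using h1

theorem neg_one_le_myLast (l : List Char) (c : Char) (k : Nat) : -1 ≤ myLast l c k := by
  induction k with
  | zero => simp [myLast]
  | succ k ih => unfold myLast; split <;> omega

theorem myLast_le (l : List Char) (c : Char) (k : Nat) : myLast l c k ≤ (k : Int) - 1 := by
  induction k with
  | zero => simp [myLast]
  | succ k ih => unfold myLast; split <;> [omega; (push_cast; omega)]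

-- ---- the rfind side ----

theorem isPrefixOf_single (c : Char) (xs : List Char) :
    [c].isPrefixOf xs = (xs[0]? == some c) := by
  cases xs with
  | nil => simp [List.isPrefixOf]
  | cons x t => simp [List.isPrefixOf, eq_comm]

theorem drop_take_getElem? (l : List Char) (i j : Nat) (h : j < i) :
    (List.drop j (l.take i))[0]? = l[j]? := by
  rw [List.getElem?_drop, List.getElem?_take_of_lt (by omega)]
  norm_num

theorem go_take (l : List Char) (c : Char) (i : Nat) (hi : i ≤ l.length) :
    ∀ j, j < i → PySem.Chars.rfind.go (l.take i) [c] j = myLast l c (j+1)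
  | 0, hj => by
    rw [PySem.Chars.rfind.go]
    have : [c].isPrefixOf (l.take i) = (l[0]? == some c) := by
      rw [isPrefixOf_single]
      congr 1
      rw [List.getElem?_take_of_lt hj]
    rw [this]
    show _ = myLast l c 1
    unfold myLast
    rcases eq_or_ne l[0]? (some c) with h | h <;> simp [h, myLast]
  | j+1, hj => by
    rw [PySem.Chars.rfind.go]
    have hpre : [c].isPrefixOf (List.drop (j+1) (l.take i)) = (l[j+1]? == some c) := by
      rw [isPrefixOf_single, drop_take_getElem? l i (j+1) hj]
    rw [hpre]
    show _ = myLast l c (j+2)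
    have hgo := go_take l c i hi j (by omega)
    unfold myLast
    rcases eq_or_ne l[j+1]? (some c) with h | h
    · simp [h]
    · simp [h, hgo, myLast]

theorem rfind_take_eq (l : List Char) (c : Char) (i : Nat) (hi : i ≤ l.length) :
    PySem.Chars.rfind (l.take i) [c] = myLast l c i := by
  unfold PySem.Chars.rfind
  have hlen : (l.take i).length = i := by simp [hi]
  rw [hlen]
  cases i with
  | zero =>
    rw [PySem.Chars.rfind.go]
    simp [myLast]
  | succ j =>
    rw [PySem.Chars.rfind.go]
    have hdrop : List.drop (j+1) (l.take (j+1)) = [] := by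
      rw [List.drop_take]; simp
    rw [hdrop]
    have hpre : [c].isPrefixOf ([] : List Char) = false := by simp [List.isPrefixOf]
    rw [hpre]
    simpa using go_take l c (j+1) hi j (by omega)

theorem rfindFrom_char_eq (l : List Char) (c : Char) (i : Nat) (h : i ≤ l.length) :
    PySem.Chars.rfindFrom l [c] 0 (some (i : Int)) = myLast l c i := by
  unfold PySem.Chars.rfindFrom
  have h1 : ¬ ((l.length : Int) < (i : Int)) := by exact_mod_cast not_lt.mpr (by exact_mod_cast h)
  have h2 : ¬ ((i : Int) < 0) := by omega
  simp only [h1, if_false, h2]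
  norm_num
  rw [if_neg h2, rfind_take_eq l c i h]
  rcases eq_or_ne (myLast l c i) (-1) with h3 | h3 <;> simp [h3]

-- ---- the find side ----

def listFirst (c : Char) : List Char → Int
  | [] => -1
  | x :: t => if x = c then 0 else (if listFirst c t = -1 then -1 else listFirst c t + 1)

theorem listFirst_ge (c : Char) : ∀ (xs : List Char), listFirst c xs = -1 ∨ 0 ≤ listFirst c xs
  | [] => Or.inl rfl
  | x :: t => by
    unfold listFirst
    split_ifs with h1 h2
    · right; omega
    · left; rfl
    · rcases listFirst_ge c t with h | h
      · exact absurd h h2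
      · right; omega

theorem go_find_char (c : Char) : ∀ (xs : List Char) (k : Nat),
    PySem.Chars.find.go [c] xs k
      = if listFirst c xs = -1 then -1 else (k : Int) + listFirst c xs
  | [], k => by
    rw [PySem.Chars.find.go]
    simp [listFirst]
  | x :: t, k => by
    rw [PySem.Chars.find.go]
    have hpre : [c].isPrefixOf (x :: t) = (c == x) := by simp [List.isPrefixOf]
    rw [hpre]
    rcases eq_or_ne x c with rfl | hxc
    · simp [listFirst]
    · have hcx : (c == x) = false := by simp; exact fun h => hxc h.symm
      rw [hcx, if_neg (by simp), go_find_char c t (k+1)]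
      simp only [listFirst, if_neg hxc]
      rcases eq_or_ne (listFirst c t) (-1) with h | h
      · simp [h]
      · have hge : 0 ≤ listFirst c t := (listFirst_ge c t).resolve_left h
        split_ifs <;> omega

theorem myFirst_eq_listFirst (l : List Char) (c : Char) : ∀ (i : Nat), i ≤ l.length →
    myFirst l c i = (if listFirst c (l.drop i) = -1 then -1 else (i : Int) + listFirst c (l.drop i))
  | i, hi => by
    by_cases h : i < l.length
    · have hdrop : l.drop i = l[i] :: l.drop (i+1) := List.drop_eq_getElem_cons h
      rw [myFirst_unfold, dif_pos h, hdrop]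
      rcases eq_or_ne l[i] c with he | he
      · simp [listFirst, he]
      · rw [if_neg he, myFirst_eq_listFirst l c (i+1) (by omega)]
        simp only [listFirst, if_neg he]
        rcases eq_or_ne (listFirst c (l.drop (i+1))) (-1) with h2 | h2
        · simp [h2]
        · have hge : 0 ≤ listFirst c (l.drop (i+1)) := (listFirst_ge c _).resolve_left h2
          split_ifs <;> omega
    · have hi' : i = l.length := by omega
      rw [myFirst_unfold, dif_neg h, hi']
      simp [listFirst]
termination_by i => l.length - i

theorem findFrom_char_eq (l : List Char) (c : Char) (i : Nat) (h : i ≤ l.length) :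
    PySem.Chars.findFrom l [c] (i : Int) none = myFirst l c i := by
  rw [PySem.Chars.findFrom_natCast l [c] i h]
  unfold PySem.Chars.find
  rw [go_find_char c (l.drop i) 0, myFirst_eq_listFirst l c i h]
  rcases eq_or_ne (listFirst c (l.drop i)) (-1) with h2 | h2 <;> simp [h2]

theorem myFirst_ge (l : List Char) (c : Char) (i : Nat) :
    myFirst l c i = -1 ∨ (i : Int) ≤ myFirst l c i := by
  by_cases h : i < l.length
  · rw [myFirst_unfold, dif_pos h]
    rcases eq_or_ne l[i] c with he | he
    · simp [he]
    · rw [if_neg he]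
      rcases myFirst_ge l c (i+1) with h2 | h2
      · exact Or.inl h2
      · right; push_cast at h2 ⊢; omega
  · rw [myFirst_unfold, dif_neg h]; left; rfl
termination_by l.length - i

theorem myFirst_le_len (l : List Char) (c : Char) (i : Nat) :
    myFirst l c i ≤ (l.length : Int) := by
  by_cases h : i < l.length
  · rw [myFirst_unfold, dif_pos h]
    rcases eq_or_ne l[i] c with he | he
    · simp [he]; omega
    · rw [if_neg he]; exact myFirst_le_len l c (i+1)
  · rw [myFirst_unfold, dif_neg h]; omega
termination_by l.length - i

-- ---- fold lemmas ----

theorem fold_opt (f : Option Int → Int → Option Int) (g : Int → Int → Int)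
    (hf : ∀ a x, f (some a) x = some (g a x)) :
    ∀ (xs : List Int) (a : Int), List.foldl f (some a) xs = some (xs.foldl g a)
  | [], a => rfl
  | x :: xs, a => by
    simp only [List.foldl_cons, hf]
    exact fold_opt f g hf xs (g a x)

theorem foldl_max_of_le (xs : List Int) (a : Int) (h : ∀ x ∈ xs, x ≤ a) :
    xs.foldl max a = a := by
  induction xs generalizing a with
  | nil => rfl
  | cons x xs ih =>
    have hx : x ≤ a := h x (by simp)
    have hmax : max a x = a := by omega
    simp only [List.foldl_cons, hmax]
    exact ih a fun y hy => h y (by simp [hy])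

theorem maxD_int_foldl (xs : List Int) (d : Int) (h : ∀ x ∈ xs, d ≤ x) :
    PySem.List.maxD xs (fun j => j) d = xs.foldl max d := by
  unfold PySem.List.maxD PySem.List.max?
  cases xs with
  | nil => rfl
  | cons x xs =>
    simp only [List.foldl_cons]
    rw [fold_opt _ max (fun a x => by simp only []; split <;> (congr 1; omega)) xs x]
    have hx : d ≤ x := h x (by simp)
    have hmax : max d x = x := by omega
    simp [hmax]

theorem foldl_min_eq_of (xs : List Int) (a m : Int) (ha : m ≤ a)
    (hall : ∀ x ∈ xs, m ≤ x) (hmem : m = a ∨ m ∈ xs) : xs.foldl min a = m := by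
  induction xs generalizing a with
  | nil =>
    rcases hmem with rfl | hm
    · rfl
    · simp at hm
  | cons x xs ih =>
    have hx : m ≤ x := hall x (by simp)
    simp only [List.foldl_cons]
    rcases hmem with rfl | hm
    · have hmin : min m x = m := by omega
      rw [hmin]
      exact ih m le_rfl (fun y hy => hall y (by simp [hy])) (Or.inl rfl)
    · rcases List.mem_cons.mp hm with rfl | hm
      · have hmin : min a m = m := by omega
        rw [hmin]
        exact ih m le_rfl (fun y hy => hall y (by simp [hy])) (Or.inl rfl)
      · exact ih (min a x) (by omega) (fun y hy => hall y (by simp [hy])) (Or.inr hm)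

theorem minD_int_eq_of_mem (xs : List Int) (d m : Int) (hm : m ∈ xs)
    (hall : ∀ x ∈ xs, m ≤ x) :
    PySem.List.minD xs (fun j => j) d = m := by
  unfold PySem.List.minD PySem.List.min?
  cases xs with
  | nil => simp at hm
  | cons x xs =>
    simp only [List.foldl_cons]
    rw [fold_opt _ min (fun a x => by simp only []; split <;> (congr 1; omega)) xs x]
    have hmin := foldl_min_eq_of xs x m (hall x (by simp))
      (fun y hy => hall y (by simp [hy]))
      (by
        rcases List.mem_cons.mp hm with rfl | hm2
        · exact Or.inl rfl
        · exact Or.inr hm2)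
    simp [hmin]

theorem fold_step (l : List Char) (k : Nat) (x : Char) :
    ∀ (S : List Char) (a : Int), a ≤ (k : Int) →
    (S.map fun c => if x = c then (k : Int) else myLast l c k).foldl max a
      = if S.contains x then (k : Int) else (S.map fun c => myLast l c k).foldl max a
  | [], a, ha => by simp
  | c :: S, a, ha => by
    simp only [List.map_cons, List.foldl_cons]
    rcases eq_or_ne x c with rfl | hxc
    · rw [if_pos rfl]
      have hseed : max a (k : Int) = k := by omega
      rw [hseed, List.contains_cons]
      simp only [BEq.rfl, Bool.true_or, if_pos]
      apply foldl_max_of_le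
      intro v hv
      obtain ⟨c', _, rfl⟩ := List.mem_map.mp hv
      split
      · omega
      · have := myLast_le l c' k; omega
    · rw [if_neg hxc]
      have hstep := fold_step l k x S (max a (myLast l c k))
        (by have := myLast_le l c k; omega)
      rw [hstep]
      simp [hxc]

theorem left_fold_eq (l : List Char) : ∀ (i : Nat), i ≤ l.length →
    (pvSeps.map fun c => myLast l c i).foldl max (-1) = lastSep l i
  | 0, _ => by
    apply foldl_max_of_le
    intro v hv
    obtain ⟨c, _, rfl⟩ := List.mem_map.mp hv
    simp [myLast]
  | k+1, hk => by
    have hklen : k < l.length := by omega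
    have hget : l[k]? = some (l[k]'hklen) := List.getElem?_eq_getElem hklen
    have hmap : (pvSeps.map fun c => myLast l c (k+1))
        = pvSeps.map fun c => if (l[k]'hklen) = c then (k : Int) else myLast l c k := by
      apply List.map_congr_left
      intro c _
      rw [myLast_succ, hget]
      simp
    rw [hmap, fold_step l k (l[k]'hklen) pvSeps (-1) (by omega)]
    have hlast : lastSep l (k+1) = if pvIsSep (l[k]'hklen) then (k : Int) else lastSep l k := by
      rw [lastSep_succ, List.getD_eq_getElem l ' ' hklen]
    rw [hlast, pvIsSep_eq, left_fold_eq l k (by omega)]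

theorem leftA_eq (l : List Char) (i : Nat) (h : i < l.length) (hs : pvIsSep (l[i]'h) = false) :
    pvLeftA l (i : Int) (i + 1) = lastSep l i := by
  cases i with
  | zero =>
    have hget : PySem.List.pyGet? l ((0 : Nat) : Int) = some (l[0]'h) := by
      rw [PySem.List.pyGet?_natCast, List.getElem?_eq_getElem h]
    unfold pvLeftA
    rw [if_pos (by omega), hget]
    simp only [hs, Bool.false_eq_true, if_false]
    show pvLeftA l (-1) 0 = lastSep l 0
    rfl
  | succ k =>
    have hget : PySem.List.pyGet? l ((k+1 : Nat) : Int) = some (l[k+1]'h) := by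
      rw [PySem.List.pyGet?_natCast, List.getElem?_eq_getElem h]
    unfold pvLeftA
    rw [if_pos (by omega), hget]
    simp only [hs, Bool.false_eq_true, if_false]
    have harg : ((k+1 : Nat) : Int) - 1 = (k : Nat) := by push_cast; ring
    rw [harg]
    have hklen : k < l.length := by omega
    have hgetk : PySem.List.pyGet? l ((k : Nat) : Int) = some (l[k]'hklen) := by
      rw [PySem.List.pyGet?_natCast, List.getElem?_eq_getElem hklen]
    rw [lastSep_succ, List.getD_eq_getElem l ' ' hklen]
    cases hsep : pvIsSep (l[k]'hklen) with
    | true =>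
      unfold pvLeftA
      rw [if_pos (by omega), hgetk]
      simp [hsep]
    | false =>
      rw [leftA_eq l k hklen hsep]
      simp
termination_by i

theorem rightA_eq (l : List Char) : ∀ (fuel i : Nat), l.length - i < fuel →
    pvRightA l (i : Int) fuel = firstSep l i
  | 0, i, hf => by omega
  | f+1, i, hf => by
    by_cases h : i < l.length
    · have hget : PySem.List.pyGet? l ((i : Nat) : Int) = some l[i] := by
        rw [PySem.List.pyGet?_natCast, List.getElem?_eq_getElem h]
      unfold pvRightA
      rw [if_pos (by exact_mod_cast h), hget, firstSep_unfold, dif_pos h]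
      cases hsep : pvIsSep (l[i]'h) with
      | true => simp [hsep]
      | false =>
        simp only [hsep, Bool.false_eq_true, if_false]
        have harg : ((i : Nat) : Int) + 1 = ((i+1 : Nat) : Int) := by push_cast; ring
        rw [harg, rightA_eq l f (i+1) (by omega)]
    · unfold pvRightA
      rw [if_neg (by exact_mod_cast h), firstSep_unfold, dif_neg h]

theorem right_fold_eq (l : List Char) (i : Nat) (hi : i ≤ l.length) :
    PySem.List.minD ((pvSeps.map fun c => myFirst l c i).filter (fun j => j != -1)) (fun j => j) (l.length : Int)
      = firstSep l i := by
  by_cases h : i < l.length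
  · by_cases hs : pvSeps.contains l[i]
    · have hmem : (i : Int) ∈ (pvSeps.map fun c => myFirst l c i).filter (fun j => j != -1) := by
        apply List.mem_filter.mpr
        constructor
        · apply List.mem_map.mpr
          refine ⟨l[i], by simpa using hs, ?_⟩
          rw [myFirst_unfold, dif_pos h, if_pos rfl]
        · simp only [bne_iff_ne, ne_eq]; omega
      have hall : ∀ v ∈ (pvSeps.map fun c => myFirst l c i).filter (fun j => j != -1), (i : Int) ≤ v := by
        intro v hv
        obtain ⟨hvm, hvne⟩ := List.mem_filter.mp hv
        obtain ⟨c, _, rfl⟩ := List.mem_map.mp hvm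
        rcases myFirst_ge l c i with h2 | h2
        · rw [h2] at hvne; simp at hvne
        · exact h2
      rw [minD_int_eq_of_mem _ _ _ hmem hall, firstSep_unfold, dif_pos h,
        if_pos (by rw [pvIsSep_eq]; exact hs)]
    · have hmap : (pvSeps.map fun c => myFirst l c i) = pvSeps.map fun c => myFirst l c (i+1) := by
        apply List.map_congr_left
        intro c hc
        rw [myFirst_unfold, dif_pos h, if_neg]
        intro he
        exact hs (by rw [he]; exact List.contains_iff_mem.mpr hc)
      have hfs : firstSep l i = firstSep l (i+1) := by
        rw [firstSep_unfold l i, dif_pos h, if_neg (by rw [pvIsSep_eq]; simpa using hs)]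
      rw [hmap, right_fold_eq l (i+1) (by omega), hfs]
  · have hi' : i = l.length := by omega
    have hmap : ∀ c ∈ pvSeps, myFirst l c i = -1 := by
      intro c _
      rw [myFirst_unfold, dif_neg h]
    have hfilter : (pvSeps.map fun c => myFirst l c i).filter (fun j => j != -1) = [] := by
      apply List.filter_eq_nil_iff.mpr
      intro v hv
      obtain ⟨c, hc, rfl⟩ := List.mem_map.mp hv
      simp [hmap c hc]
    rw [hfilter, firstSep_unfold, dif_neg h, hi']
    rfl
termination_by l.length - i

-- pyGet? on a negative in-range index reads position len + i
theorem pyGet?_neg_eq (l : List Char) (p : Int) (h1 : -(l.length : Int) ≤ p) (h2 : p < 0) :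
    PySem.List.pyGet? l p = l[((l.length : Int) + p).toNat]? := by
  rw [PySem.List.pyGet?_neg l h2 h1]
  congr 1
  omega

-- ===== VERDICT (by name: the statement is the Claim_ definition above) =====
theorem corrente_spec : Claim_unchanged_corrente := by
  intro s p _hdom hpre hnD
  obtain ⟨hp1, hp2⟩ := hpre
  cases hc : PySem.List.pyGet? s.toList p with
  | none =>
    exfalso
    have := (PySem.List.pyGet?_eq_none_iff s.toList p).mp hc
    exact this (by unfold PySem.Raise.InRange; omega)
  | some c =>
    by_cases hsep : pvIsSep c
    · show corrente s p = corrente_alt s p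
      simp only [corrente, corrente_alt, hc, hsep, if_pos]
    · rcases lt_or_ge p 0 with hneg | hpos
      · exfalso
        apply hnD
        refine ⟨hneg, hp1, ?_⟩
        have hget : s.toList[((s.toList.length : Int) + p).toNat]? = some c := by
          rw [← pyGet?_neg_eq s.toList p hp1 hneg]; exact hc
        have hidx : ((s.toList.length : Int) + p).toNat < s.toList.length := by omega
        rw [List.getD_eq_getElem s.toList ' ' hidx]
        have hce : s.toList[((s.toList.length : Int) + p).toNat] = c := by
          have := List.getElem?_eq_getElem hidx
          rw [this] at hget
          exact Option.some_inj.mp hget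
        rw [hce]
        intro hmem
        rw [pvIsSep_eq] at hsep
        exact hsep (List.contains_iff_mem.mpr hmem)
      · -- 0 ≤ p : the real case
        set l := s.toList with hl
        obtain ⟨i, rfl⟩ : ∃ i : Nat, p = (i : Int) := ⟨p.toNat, by omega⟩
        have hilen : i < l.length := by exact_mod_cast hp2
        have hgetc : c = l[i] := by
          rw [PySem.List.pyGet?_natCast, List.getElem?_eq_getElem hilen] at hc
          exact (Option.some_inj.mp hc).symm
        subst hgetc
        show corrente s (i : Int) = corrente_alt s (i : Int)
        simp only [corrente, corrente_alt, ← hl, hc, hsep, Bool.false_eq_true, if_false]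
        have hfuel : ((i : Int)).toNat + 1 = i + 1 := by omega
        rw [hfuel, leftA_eq l i hilen (by simpa using hsep)]
        rw [rightA_eq l (2 * l.length + 1) i (by omega)]
        rw [if_pos (by omega)]
        have hbl : PySem.List.maxD (pvSeps.map fun c => PySem.Chars.rfindFrom l [c] 0 (some (i : Int))) (fun j => j) (-1)
            = lastSep l i := by
          have hmap : (pvSeps.map fun c => PySem.Chars.rfindFrom l [c] 0 (some (i : Int)))
              = pvSeps.map fun c => myLast l c i := by
            apply List.map_congr_left
            intro c _
            exact rfindFrom_char_eq l c i (by omega)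
          rw [hmap, maxD_int_foldl]
          · exact left_fold_eq l i (by omega)
          · intro v hv
            obtain ⟨c, _, rfl⟩ := List.mem_map.mp hv
            exact neg_one_le_myLast l c i
        have hbr : PySem.List.minD ((pvSeps.map fun c => PySem.Chars.findFrom l [c] (i : Int) none).filter (fun j => j != -1)) (fun j => j) (l.length : Int)
            = firstSep l i := by
          have hmap : (pvSeps.map fun c => PySem.Chars.findFrom l [c] (i : Int) none)
              = pvSeps.map fun c => myFirst l c i := by
            apply List.map_congr_left
            intro c _
            exact findFrom_char_eq l c i (by omega)
          rw [hmap]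
          exact right_fold_eq l i (by omega)
        rw [hbl, hbr]

theorem corrente_changed : Claim_changed_corrente := by
  unfold Claim_changed_corrente; decide
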